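-- pv_equiv track=rewrite | github.com/sphereeversiondude/webgl-sphere-eversion | test_eversion.py | createFPairs
-- ===== SOURCE A (Python) =====
-- def createFPairs(faces):
--     fPairs = []
--     for x in faces:
--         for y in faces:
--             x0 = set(x)
--             y0 = set(y)
--             if len(x0.intersection(y0))==1:
--                 fPairs.append([x,y])
--     return fPairs
-- ===== SOURCE B (Python) =====
-- def createFPairs(faces):
--     # vertex -> indices of faces containing it (increasing)
--     index = {}
--     for j, f in enumerate(faces):
--         for v in set(f):
--             index.setdefault(v, []).append(j)
--     out = []
--     for x in faces:
--         sx = set(x)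
--         cand = sorted({j for v in sx for j in index.get(v, ())})
--         for j in cand:
--             if len(sx & set(faces[j])) == 1:
--                 out.append([x, faces[j]])
--     return out
-- ===== Notes on version B (the rewrite author's own statement) =====
-- stated objective: alternative
-- what changed: B builds a vertex-to-face-indices inverted index once and, per face, tests only the sorted candidate faces sharing at least one vertex, instead of A's all-pairs double scan with sets rebuilt in the inner loop.
import Mathlib
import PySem

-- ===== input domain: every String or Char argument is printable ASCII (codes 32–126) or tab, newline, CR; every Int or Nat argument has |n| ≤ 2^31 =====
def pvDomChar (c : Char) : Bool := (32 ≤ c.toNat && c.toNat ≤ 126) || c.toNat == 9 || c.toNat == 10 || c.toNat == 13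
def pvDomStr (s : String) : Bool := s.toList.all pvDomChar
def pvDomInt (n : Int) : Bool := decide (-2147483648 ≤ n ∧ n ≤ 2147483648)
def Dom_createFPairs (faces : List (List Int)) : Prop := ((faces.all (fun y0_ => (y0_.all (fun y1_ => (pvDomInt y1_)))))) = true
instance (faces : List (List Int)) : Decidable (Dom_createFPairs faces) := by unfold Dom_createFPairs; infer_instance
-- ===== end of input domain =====

-- B replaces A's all-pairs double scan by an inverted index (vertex -> face indices) and per
-- face tests only the sorted candidate faces sharing at least one vertex (objective: alternative).

-- ===== PORT A =====
def createFPairs (faces : List (List Int)) : List (List (List Int)) :=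
  faces.foldl (fun fPairs x =>
    faces.foldl (fun fPairs y =>
      let x0 := PySem.Set.ofList x
      let y0 := PySem.Set.ofList y
      if (PySem.Set.inter x0 y0).length == 1 then fPairs ++ [[x, y]] else fPairs)
      fPairs) []

-- ===== PORT B =====
-- index = {}; for j, f in enumerate(faces): for v in set(f): index.setdefault(v, []).append(j)
def pvIndexB (faces : List (List Int)) : PySem.Dict Int (List Int) :=
  (PySem.List.enumerate faces).foldl (fun index p =>
    (PySem.Set.ofList p.2).foldl (fun index v =>
      index.modify v [] (fun l => l ++ [p.1])) index) PySem.Dict.empty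

-- cand = sorted({j for v in sx for j in index.get(v, ())})
def pvCandB (index : PySem.Dict Int (List Int)) (sx : PySem.Set Int) : List Int :=
  PySem.List.sorted (sx.foldl (fun s v => PySem.Set.update s (index.getD v [])) PySem.Set.empty)
    (fun j => j) false

-- faces[j]: every candidate index j is in range, where pyGetD is exact
def createFPairs_alt (faces : List (List Int)) : List (List (List Int)) :=
  let index := pvIndexB faces
  faces.foldl (fun out x =>
    let sx := PySem.Set.ofList x
    (pvCandB index sx).foldl (fun out j =>
      if (PySem.Set.inter sx (PySem.Set.ofList (PySem.List.pyGetD faces j []))).length == 1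
      then out ++ [[x, PySem.List.pyGetD faces j []]] else out) out) []

-- ===== PRECONDITION & SPEC =====
def Spec_createFPairs (faces : List (List Int)) (out : List (List (List Int))) : Prop := out = createFPairs_alt faces
instance (faces : List (List Int)) (out : List (List (List Int))) : Decidable (Spec_createFPairs faces out) := by unfold Spec_createFPairs; infer_instance

-- ===== CLAIM (what is proved, stated in full; the proofs are below) =====
def Claim_equal_createFPairs : Prop := ∀ (faces : List (List Int)), Dom_createFPairs faces → Spec_createFPairs faces (createFPairs faces)

-- ===== LEMMAS AND PROOFS =====

-- the nested index-building loop is the flat grouping loop over (vertex, face-index) pairs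
theorem pv_foldl_nested (l : List (Int × List Int)) (d : PySem.Dict Int (List Int)) :
    l.foldl (fun d p => (PySem.Set.ofList p.2).foldl (fun d v => d.modify v [] (fun t => t ++ [p.1])) d) d
    = (l.flatMap (fun p => (PySem.Set.ofList p.2).map (fun v => (v, p.1)))).foldl
        (fun d q => d.modify q.1 [] (fun t => t ++ [q.2])) d := by
  induction l generalizing d with
  | nil => rfl
  | cons p t ih =>
      simp only [List.foldl_cons, List.flatMap_cons, List.foldl_append, List.foldl_map]
      exact ih _

-- membership in the inverted index
theorem pv_mem_index (faces : List (List Int)) (v j : Int) :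
    j ∈ (pvIndexB faces).getD v [] ↔
      ∃ (k : Nat) (h : k < faces.length), j = (k : Int) ∧ v ∈ faces[k] := by
  unfold pvIndexB
  rw [pv_foldl_nested, PySem.Dict.getD_foldl_modify_append]
  simp [List.mem_filter, List.mem_flatMap, PySem.Set.mem_ofList, PySem.List.mem_enumerate_iff]
  constructor
  · rintro ⟨k, ⟨hk, hv⟩, rfl⟩; exact ⟨k, rfl, hk, hv⟩
  · rintro ⟨k, rfl, hk, hv⟩; exact ⟨k, ⟨hk, hv⟩, rfl⟩

-- membership in the candidate-set building loop
theorem pv_mem_foldl_update (l : List Int) (g : Int → List Int) (s0 : PySem.Set Int) (j : Int) :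
    j ∈ l.foldl (fun s v => PySem.Set.update s (g v)) s0 ↔ j ∈ s0 ∨ ∃ v ∈ l, j ∈ g v := by
  induction l generalizing s0 with
  | nil => simp
  | cons a t ih =>
      simp only [List.foldl_cons, ih, PySem.Set.mem_update, List.mem_cons]
      constructor
      · rintro ((h | h) | ⟨v, hv, hj⟩)
        · exact Or.inl h
        · exact Or.inr ⟨a, Or.inl rfl, h⟩
        · exact Or.inr ⟨v, Or.inr hv, hj⟩
      · rintro (h | ⟨v, (rfl | hv), hj⟩)
        · exact Or.inl (Or.inl h)
        · exact Or.inl (Or.inr hj)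
        · exact Or.inr ⟨v, hv, hj⟩

theorem pv_nodup_foldl_update (l : List Int) (g : Int → List Int) (s0 : PySem.Set Int)
    (h : s0.Nodup) : (l.foldl (fun s v => PySem.Set.update s (g v)) s0).Nodup := by
  induction l generalizing s0 with
  | nil => exact h
  | cons a t ih =>
      simp only [List.foldl_cons]
      exact ih _ (PySem.Set.nodup_update _ _ h)

-- membership in the sorted candidate list
theorem pv_mem_cand (faces : List (List Int)) (x : List Int) (j : Int) :
    j ∈ pvCandB (pvIndexB faces) (PySem.Set.ofList x) ↔
      ∃ v, v ∈ x ∧ j ∈ (pvIndexB faces).getD v [] := by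
  unfold pvCandB
  rw [PySem.List.mem_sorted, pv_mem_foldl_update]
  simp [PySem.Set.mem_ofList]

-- two strictly increasing integer lists with the same members are equal
theorem pv_eq_of_pairwise_lt {l₁ l₂ : List Int} (h₁ : l₁.Pairwise (· < ·))
    (h₂ : l₂.Pairwise (· < ·)) (hm : ∀ x, x ∈ l₁ ↔ x ∈ l₂) : l₁ = l₂ := by
  exact ((List.perm_ext_iff_of_nodup (h₁.imp ne_of_lt) (h₂.imp ne_of_lt)).mpr hm).eq_of_pairwise
    (fun a b _ _ h h' => absurd h' (lt_asymm h)) h₁ h₂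

-- sorted() of a duplicate-free integer list is strictly increasing
theorem pv_sorted_pairwise_lt (base : List Int) (hnd : base.Nodup) :
    (PySem.List.sorted base (fun j => j) false).Pairwise (· < ·) := by
  have hle := PySem.List.sorted_pairwise base (fun j => j)
  have hnd' : (PySem.List.sorted base (fun j => j) false).Nodup :=
    (PySem.List.sorted_perm base (fun j => j) false).nodup_iff.mpr hnd
  exact (hle.and hnd').imp (fun h => lt_of_le_of_ne h.1 h.2)

-- the per-face inner loops produce the same pair list
theorem pv_inner (faces : List (List Int)) (x : List Int) :
    (faces.filter (fun y => (PySem.Set.inter (PySem.Set.ofList x) (PySem.Set.ofList y)).length == 1)).map (fun y => [x, y]) =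
    ((pvCandB (pvIndexB faces) (PySem.Set.ofList x)).filter
        (fun j => (PySem.Set.inter (PySem.Set.ofList x) (PySem.Set.ofList (PySem.List.pyGetD faces j []))).length == 1)).map
      (fun j => [x, PySem.List.pyGetD faces j []]) := by
  have hfilter :
      (pvCandB (pvIndexB faces) (PySem.Set.ofList x)).filter
          (fun j => (PySem.Set.inter (PySem.Set.ofList x) (PySem.Set.ofList (PySem.List.pyGetD faces j []))).length == 1)
        = (PySem.List.pyRange 0 (PySem.List.len faces)).filter
          (fun j => (PySem.Set.inter (PySem.Set.ofList x) (PySem.Set.ofList (PySem.List.pyGetD faces j []))).length == 1) := by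
    apply pv_eq_of_pairwise_lt
    · exact (pv_sorted_pairwise_lt _ (pv_nodup_foldl_update _ _ _ List.nodup_nil)).filter _
    · exact (PySem.List.pairwise_lt_pyRange_one 0 _).filter _
    · intro j
      simp only [List.mem_filter]
      constructor
      · rintro ⟨hj, hP⟩
        refine ⟨?_, hP⟩
        rcases (pv_mem_cand faces x j).mp hj with ⟨v, hv, hidx⟩
        rcases (pv_mem_index faces v j).mp hidx with ⟨k, hk, rfl, _⟩
        rw [PySem.List.mem_pyRange_one]
        exact ⟨Int.natCast_nonneg k, by simpa [PySem.List.len] using hk⟩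
      · rintro ⟨hj, hP⟩
        refine ⟨?_, hP⟩
        rw [PySem.List.mem_pyRange_one] at hj
        obtain ⟨h0, hlt⟩ := hj
        obtain ⟨k, rfl⟩ : ∃ k : Nat, j = (k : Int) := ⟨j.toNat, (Int.toNat_of_nonneg h0).symm⟩
        have hk : k < faces.length := by simpa [PySem.List.len] using hlt
        rw [PySem.List.pyGetD_natCast, List.getD_eq_getElem _ _ hk] at hP
        have hlen : (PySem.Set.inter (PySem.Set.ofList x) (PySem.Set.ofList faces[k])).length = 1 := by
          simpa using hP
        obtain ⟨v, hv⟩ := List.length_eq_one_iff.mp hlen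
        have hvmem : v ∈ PySem.Set.inter (PySem.Set.ofList x) (PySem.Set.ofList faces[k]) := by
          rw [hv]; exact List.mem_singleton_self v
        have hb := (PySem.Set.mem_inter _ _ _).mp hvmem
        apply (pv_mem_cand faces x (k : Int)).mpr
        refine ⟨v, (PySem.Set.mem_ofList _ _).mp hb.1, (pv_mem_index faces v (k : Int)).mpr ?_⟩
        exact ⟨k, hk, rfl, (PySem.Set.mem_ofList _ _).mp hb.2⟩
  rw [hfilter]
  conv_lhs => rw [← PySem.List.map_pyGetD_pyRange_zero faces []]
  rw [List.filter_map, List.map_map]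
  rfl

-- ===== VERDICT (by name: the statement is the Claim_ definition above) =====
theorem createFPairs_spec : Claim_equal_createFPairs := by
  intro faces _
  show createFPairs faces = createFPairs_alt faces
  unfold createFPairs createFPairs_alt
  simp only [PySem.List.foldl_append_if, PySem.List.foldl_append_eq_flatMap, List.nil_append]
  exact congrArg (fun g => List.flatMap g faces) (funext (fun x => pv_inner faces x))
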